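-- pv_equiv track=rewrite | github.com/Pierr-Louis/main_app | ui/matrice_app.py | _compute_sensor_type
-- ===== SOURCE A (Python) =====
-- def _compute_sensor_type(sensors):
--
--     types = [
--         s.get("type")
--         for s in sensors
--         if s.get("type") not in (None, "", " ")
--     ]
--
--     if not types:
--         return None
--
--     unique = set(types)
--
--     if len(unique) == 1:
--         return unique.pop()
--
--     return "types mixtes"
-- ===== SOURCE B (Python) =====
-- def _compute_sensor_type(sensors):
--     found = None
--     for s in sensors:
--         t = s.get("type")
--         if t in (None, "", " "):
--             continue
--         if found is None:
--             found = t
--         elif t != found: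
--             return "types mixtes"
--     return found
-- ===== Notes on version B (the rewrite author's own statement) =====
-- stated objective: simpler
-- what changed: Replaced the build-a-list-then-set-then-measure pipeline by a single pass maintaining one candidate type with an early return on the first conflicting type.
import Mathlib
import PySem

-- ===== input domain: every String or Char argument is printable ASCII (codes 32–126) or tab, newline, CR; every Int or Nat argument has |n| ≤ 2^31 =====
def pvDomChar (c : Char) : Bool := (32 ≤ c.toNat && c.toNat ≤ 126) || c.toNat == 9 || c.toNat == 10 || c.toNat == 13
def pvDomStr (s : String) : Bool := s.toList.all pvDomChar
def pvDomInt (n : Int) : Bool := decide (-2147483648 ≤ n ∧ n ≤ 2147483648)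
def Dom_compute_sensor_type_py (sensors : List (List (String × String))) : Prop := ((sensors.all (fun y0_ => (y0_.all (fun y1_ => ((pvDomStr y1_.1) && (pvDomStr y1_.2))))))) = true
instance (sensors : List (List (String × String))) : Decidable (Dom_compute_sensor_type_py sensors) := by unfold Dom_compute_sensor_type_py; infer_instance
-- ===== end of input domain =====

-- B replaces A's list-then-set-then-count pipeline with one pass keeping a single candidate and an early return on conflict; return values agree on all inputs.

-- ===== PORT A =====
-- the comprehension's filter: keep s.get("type") unless it is None, "" or " "
def pvKeepType (s : List (String × String)) : Option String :=
  match List.lookup "type" s with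
  | none => none
  | some t => if t = "" ∨ t = " " then none else some t

def compute_sensor_type_py (sensors : List (List (String × String))) : Option String :=
  let types := sensors.filterMap pvKeepType
  if types = [] then none
  else
    let unique : PySem.Set String := PySem.Set.ofList types
    -- unique.pop(): taken only when len(unique) == 1, so it is the set's single element
    if unique.length = 1 then unique.head? else some "types mixtes"

-- ===== PORT B =====
def pvAltLoop (found : Option String) : List (List (String × String)) → Option String
  | [] => found
  | s :: rest =>
    match List.lookup "type" s with
    | none => pvAltLoop found rest
    | some t =>
      if t = "" ∨ t = " " then pvAltLoop found rest
      else
        match found with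
        | none => pvAltLoop (some t) rest
        | some f => if t ≠ f then some "types mixtes" else pvAltLoop found rest

def compute_sensor_type_py_alt (sensors : List (List (String × String))) : Option String :=
  pvAltLoop none sensors

-- ===== PRECONDITION & SPEC =====
def Spec_compute_sensor_type_py (sensors : List (List (String × String))) (out : Option String) : Prop := out = compute_sensor_type_py_alt sensors
instance (sensors : List (List (String × String))) (out : Option String) : Decidable (Spec_compute_sensor_type_py sensors out) := by unfold Spec_compute_sensor_type_py; infer_instance

-- ===== CLAIM (what is proved, stated in full; the proofs are below) =====
def Claim_equal_compute_sensor_type_py : Prop := ∀ (sensors : List (List (String × String))), Dom_compute_sensor_type_py sensors → Spec_compute_sensor_type_py sensors (compute_sensor_type_py sensors)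

-- ===== LEMMAS AND PROOFS =====

-- B's loop over the sensors equals the same loop over the kept type strings
def pvStrLoop (found : Option String) : List String → Option String
  | [] => found
  | t :: r =>
    match found with
    | none => pvStrLoop (some t) r
    | some f => if t ≠ f then some "types mixtes" else pvStrLoop found r

theorem pvAltLoop_eq_strLoop (sensors : List (List (String × String))) (found : Option String) :
    pvAltLoop found sensors = pvStrLoop found (sensors.filterMap pvKeepType) := by
  induction sensors generalizing found with
  | nil => cases found <;> rfl
  | cons s rest ih =>
    simp only [List.filterMap_cons, pvAltLoop, pvKeepType]
    cases h : List.lookup "type" s with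
    | none => exact ih found
    | some t =>
      by_cases he : t = "" ∨ t = " "
      · simp only [if_pos he]
        exact ih found
      · simp only [if_neg he]
        cases found with
        | none =>
          simp only [pvStrLoop]
          exact ih (some t)
        | some f =>
          simp only [pvStrLoop]
          by_cases hf : t = f <;> simp [hf, ih, pvKeepType]

theorem pvStrLoop_some (r : List String) (g : String) :
    pvStrLoop (some g) r =
      if r.all (fun x => x = g) then some g else some "types mixtes" := by
  induction r with
  | nil => rfl
  | cons t r ih =>
    simp only [pvStrLoop, List.all_cons]
    by_cases ht : t = g
    · simp [ht, ih]
    · simp [ht]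

theorem compute_sensor_type_py_spec : Claim_equal_compute_sensor_type_py := by
  intro sensors _
  unfold Spec_compute_sensor_type_py compute_sensor_type_py compute_sensor_type_py_alt
  rw [pvAltLoop_eq_strLoop]
  cases h : sensors.filterMap pvKeepType with
  | nil => rfl
  | cons t r =>
    simp only [reduceCtorEq, PySem.Set.ofList_cons, pvStrLoop]
    rw [pvStrLoop_some r t]
    by_cases hall : r.all (fun x => x = t) = true
    · have hd : PySem.Set.discard (PySem.Set.ofList r) t = [] := by
        rw [List.eq_nil_iff_forall_not_mem]
        intro y hy
        rw [PySem.Set.mem_discard] at hy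
        have hyr := (PySem.Set.mem_ofList r y).mp hy.1
        exact hy.2 (by simpa using List.all_eq_true.mp hall y hyr)
      simp [hall, hd]
    · have hd : PySem.Set.discard (PySem.Set.ofList r) t ≠ [] := by
        simp only [List.all_eq_true, decide_eq_true_eq] at hall
        push Not at hall
        obtain ⟨y, hy, hne⟩ := hall
        intro hnil
        have hmem : y ∈ PySem.Set.discard (PySem.Set.ofList r) t := by
          rw [PySem.Set.mem_discard, PySem.Set.mem_ofList]
          exact ⟨hy, hne⟩
        simp [hnil] at hmem
      simp [hall, hd]
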